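-- pv_equiv track=rewrite | github.com/godeater9678/nlp | preprocess/preprocessor.py | split_questions_and_answers
-- ===== SOURCE A (Python) =====
-- def split_questions_and_answers(lines):
--     questions = []
--     answers = []
--     current_question = None
--     current_answer = []
--
--     for line in lines:
--         line = line.strip()
--         if not line:  # 빈 줄은 무시
--             continue
--         if line.endswith("?"):  # 질문인지 확인
--             if current_question and current_answer:
--                 answers.append(" ".join(current_answer))  # 이전 답변 저장
--             current_question = line
--             questions.append(current_question)
--             current_answer = []  # 답변 초기화
--         elif current_question:  # 답변으로 간주
--             current_answer.append(line)
--
--     # 마지막 답변 추가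
--     if current_answer:
--         answers.append(" ".join(current_answer))
--
--     return questions, answers
-- ===== SOURCE B (Python) =====
-- from itertools import groupby
--
-- def split_questions_and_answers(lines):
--     items = [l for l in (x.strip() for x in lines) if l]
--     questions = [l for l in items if l.endswith("?")]
--     answers = []
--     seen_q = False
--     for is_q, group in groupby(items, key=lambda l: l.endswith("?")):
--         if is_q:
--             seen_q = True
--         elif seen_q:
--             answers.append(" ".join(group))
--     return questions, answers
-- ===== Notes on version B (the rewrite author's own statement) =====
-- stated objective: idiomatic
-- what changed: A's single stateful loop (current_question/current_answer accumulators with a trailing flush) is replaced by independent passes: a comprehension for the cleaned items, a filter for the questions, and itertools.groupby over runs of non-question lines joined per run for the answers.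
import Mathlib
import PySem

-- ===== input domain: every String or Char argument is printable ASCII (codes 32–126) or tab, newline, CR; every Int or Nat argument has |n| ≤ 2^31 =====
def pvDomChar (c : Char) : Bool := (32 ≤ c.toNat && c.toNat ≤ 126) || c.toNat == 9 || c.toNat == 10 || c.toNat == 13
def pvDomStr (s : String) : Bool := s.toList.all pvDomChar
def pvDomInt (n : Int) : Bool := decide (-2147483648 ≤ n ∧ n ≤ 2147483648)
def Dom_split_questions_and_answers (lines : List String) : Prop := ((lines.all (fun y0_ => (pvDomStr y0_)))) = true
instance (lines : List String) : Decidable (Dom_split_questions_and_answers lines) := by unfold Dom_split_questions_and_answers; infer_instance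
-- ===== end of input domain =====

-- B re-decomposes A's single accumulator loop into independent passes: filter for questions,
-- groupby-runs for answers (objective: simpler/idiomatic decomposition; same O(n) cost).

-- ===== PORT A =====
-- Python truthiness of `current_question` (Optional[str])
def pvTruthyOptStr (cq : Option String) : Bool := cq.elim false (fun q => decide (q ≠ ""))

-- the body of A's for-loop; state = (questions, answers, current_question, current_answer)
def pvStepA (s : List String × List String × Option String × List String) (line : String) :
    List String × List String × Option String × List String :=
  let (qs, ans, cq, ca) := s
  let l := PySem.Str.strip line
  if l = "" then (qs, ans, cq, ca)
  else if PySem.Str.endswith l "?" then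
    let ans' := if pvTruthyOptStr cq ∧ ca ≠ [] then ans ++ [PySem.Str.join " " ca] else ans
    (qs ++ [l], ans', some l, [])
  else if pvTruthyOptStr cq then (qs, ans, cq, ca ++ [l])
  else (qs, ans, cq, ca)

def split_questions_and_answers (lines : List String) : List String × List String :=
  let s := lines.foldl pvStepA ([], [], none, [])
  let (qs, ans, _, ca) := s
  (qs, if ca ≠ [] then ans ++ [PySem.Str.join " " ca] else ans)

-- ===== PORT B =====
-- itertools.groupby(items, key = endswith '?'): maximal runs with their key
def pvGroupRuns (its : List String) : List (Bool × List String) :=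
  match its with
  | [] => []
  | x :: xs =>
    let k := PySem.Str.endswith x "?"
    let run := xs.takeWhile (fun y => PySem.Str.endswith y "?" == k)
    let rest := xs.dropWhile (fun y => PySem.Str.endswith y "?" == k)
    (k, x :: run) :: pvGroupRuns rest
termination_by its.length
decreasing_by
  exact Nat.lt_succ_of_le (List.length_dropWhile_le _ _)

def split_questions_and_answers_alt (lines : List String) : List String × List String :=
  let items := (lines.map PySem.Str.strip).filter (fun l => l ≠ "")
  let questions := items.filter (fun l => PySem.Str.endswith l "?")
  let st := (pvGroupRuns items).foldl
    (fun (st : Bool × List String) g =>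
      if g.1 then (true, st.2)
      else if st.1 then (st.1, st.2 ++ [PySem.Str.join " " g.2])
      else st)
    (false, [])
  (questions, st.2)

-- ===== PRECONDITION & SPEC =====
def Spec_split_questions_and_answers (lines : List String) (out : List String × List String) : Prop := out = split_questions_and_answers_alt lines
instance (lines : List String) (out : List String × List String) : Decidable (Spec_split_questions_and_answers lines out) := by unfold Spec_split_questions_and_answers; infer_instance

-- ===== CLAIM (what is proved, stated in full; the proofs are below) =====
def Claim_equal_split_questions_and_answers : Prop := ∀ (lines : List String), Dom_split_questions_and_answers lines → Spec_split_questions_and_answers lines (split_questions_and_answers lines)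

-- ===== LEMMAS AND PROOFS =====

-- proof-only helpers
def pvIsQ (l : String) : Bool := PySem.Str.endswith l "?"

-- pvStepA on an already-stripped non-empty line
def pvCore (s : List String × List String × Option String × List String) (l : String) :
    List String × List String × Option String × List String :=
  let (qs, ans, cq, ca) := s
  if pvIsQ l then
    let ans' := if pvTruthyOptStr cq ∧ ca ≠ [] then ans ++ [PySem.Str.join " " ca] else ans
    (qs ++ [l], ans', some l, [])
  else if pvTruthyOptStr cq then (qs, ans, cq, ca ++ [l])
  else (qs, ans, cq, ca)

-- reference form of the answers A accumulates, given the seen-question flag and the pending run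
def pvAnsRef (seen : Bool) (ca : List String) : List String → List String
  | [] => if ca ≠ [] then [PySem.Str.join " " ca] else []
  | l :: ls =>
    if pvIsQ l then
      (if seen ∧ ca ≠ [] then [PySem.Str.join " " ca] else []) ++ pvAnsRef true [] ls
    else if seen then pvAnsRef seen (ca ++ [l]) ls
    else pvAnsRef seen ca ls

lemma pvFoldStrip (lines : List String) (s : List String × List String × Option String × List String) :
    lines.foldl pvStepA s =
      ((lines.map PySem.Str.strip).filter (fun l => l ≠ "")).foldl pvCore s := by
  induction lines generalizing s with
  | nil => rfl
  | cons line rest ih =>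
    simp only [List.foldl_cons, List.map_cons, List.filter_cons]
    by_cases h : PySem.Str.strip line = ""
    · simp [h, pvStepA, ih]
    · have hstep : pvStepA s line = pvCore s (PySem.Str.strip line) := by
        simp [pvStepA, pvCore, pvIsQ, h]
      simp [h, hstep, ih]

lemma pvIsQ_ne_empty {l : String} (h : pvIsQ l = true) : l ≠ "" := by
  intro he; subst he; simp [pvIsQ] at h; revert h; decide

lemma pvMain (its : List String) (qs ans : List String) (cq : Option String) (ca : List String) :
    (fun s : List String × List String × Option String × List String =>
      (s.1, if s.2.2.2 ≠ [] then s.2.1 ++ [PySem.Str.join " " s.2.2.2] else s.2.1))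
      (its.foldl pvCore (qs, ans, cq, ca)) =
    (qs ++ its.filter pvIsQ, ans ++ pvAnsRef (pvTruthyOptStr cq) ca its) := by
  induction its generalizing qs ans cq ca with
  | nil => simp [pvAnsRef]; split_ifs <;> simp
  | cons l ls ih =>
    by_cases hq : pvIsQ l = true
    · have hc : pvCore (qs, ans, cq, ca) l =
          (qs ++ [l], (if pvTruthyOptStr cq ∧ ca ≠ [] then ans ++ [PySem.Str.join " " ca] else ans),
            some l, []) := by
        simp [pvCore, hq]
      have ht : pvTruthyOptStr (some l) = true := by
        simp [pvTruthyOptStr, pvIsQ_ne_empty hq]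
      rw [List.foldl_cons, hc, ih, ht]
      simp only [List.filter_cons, hq, pvAnsRef]
      split_ifs <;> simp
    · by_cases hs : pvTruthyOptStr cq = true
      · have hc : pvCore (qs, ans, cq, ca) l = (qs, ans, cq, ca ++ [l]) := by
          simp [pvCore, hq, hs]
        rw [List.foldl_cons, hc, ih]
        simp [hq, pvAnsRef, hs]
      · have hc : pvCore (qs, ans, cq, ca) l = (qs, ans, cq, ca) := by
          simp [pvCore, hq, hs]
        rw [List.foldl_cons, hc, ih]
        simp only [Bool.not_eq_true] at hs
        simp [hq, pvAnsRef, hs]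

lemma pvAnsRef_q_run (run rest : List String) (h : ∀ y ∈ run, pvIsQ y = true) :
    pvAnsRef true [] (run ++ rest) = pvAnsRef true [] rest := by
  induction run with
  | nil => rfl
  | cons y ys ih =>
    simp only [List.cons_append, pvAnsRef, h y (List.mem_cons_self ..)]
    simp [ih (fun z hz => h z (List.mem_cons_of_mem _ hz))]

lemma pvAnsRef_a_run (run : List String) (ca rest : List String) (h : ∀ y ∈ run, pvIsQ y = false) :
    pvAnsRef true ca (run ++ rest) = pvAnsRef true (ca ++ run) rest := by
  induction run generalizing ca with
  | nil => simp
  | cons y ys ih =>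
    have hy := h y (List.mem_cons_self ..)
    simp only [List.cons_append]
    rw [pvAnsRef]
    simp only [hy, Bool.false_eq_true, if_false, if_true]
    rw [ih (ca ++ [y]) (fun z hz => h z (List.mem_cons_of_mem _ hz))]
    simp

lemma pvAnsRef_skip_run (run rest : List String) (h : ∀ y ∈ run, pvIsQ y = false) :
    pvAnsRef false [] (run ++ rest) = pvAnsRef false [] rest := by
  induction run with
  | nil => rfl
  | cons y ys ih =>
    simp only [List.cons_append, pvAnsRef, h y (List.mem_cons_self ..)]
    simp [ih (fun z hz => h z (List.mem_cons_of_mem _ hz))]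

lemma pvGroupFoldAux (n : Nat) : ∀ its : List String, its.length ≤ n → ∀ (seen : Bool) (ans : List String),
    ((pvGroupRuns its).foldl
      (fun (st : Bool × List String) g =>
        if g.1 then (true, st.2)
        else if st.1 then (st.1, st.2 ++ [PySem.Str.join " " g.2])
        else st)
      (seen, ans)).2 = ans ++ pvAnsRef seen [] its := by
  induction n with
  | zero =>
    intro its h
    have h0 : its = [] := List.eq_nil_of_length_eq_zero (Nat.le_zero.mp h)
    subst h0
    intro seen ans
    simp [pvGroupRuns, pvAnsRef]
  | succ n ihn =>
    intro its hlen seen ans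
    cases its with
    | nil => simp [pvGroupRuns, pvAnsRef]
    | cons x xs =>
      rw [pvGroupRuns]
      simp only [List.foldl_cons]
      have hrest_le : (xs.dropWhile (fun y => PySem.Str.endswith y "?" == PySem.Str.endswith x "?")).length ≤ n :=
        le_trans (List.length_dropWhile_le _ _) (Nat.le_of_succ_le_succ (by simpa using hlen))
      have ih := ihn _ hrest_le
      have hsplit : xs = xs.takeWhile (fun y => PySem.Str.endswith y "?" == PySem.Str.endswith x "?")
          ++ xs.dropWhile (fun y => PySem.Str.endswith y "?" == PySem.Str.endswith x "?") :=
        (List.takeWhile_append_dropWhile).symm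
      have hrun : ∀ y ∈ xs.takeWhile (fun y => PySem.Str.endswith y "?" == PySem.Str.endswith x "?"),
          pvIsQ y = pvIsQ x := by
        intro y hy
        have := List.mem_takeWhile_imp hy
        simpa [pvIsQ] using this
      by_cases hk : pvIsQ x = true
      · have hk' : PySem.Str.endswith x "?" = true := hk
        rw [if_pos hk']
        rw [ih]
        conv_rhs => rw [hsplit]
        rw [pvAnsRef]
        simp only [hk, if_true]
        rw [pvAnsRef_q_run _ _ (fun y hy => (hrun y hy).trans hk)]
        simp
      · simp only [Bool.not_eq_true] at hk
        have hk' : PySem.Str.endswith x "?" = false := hk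
        rw [if_neg (by rw [hk']; simp)]
        by_cases hs : seen = true
        · subst hs
          simp only [if_true]
          rw [ih]
          conv_rhs => rw [hsplit]
          rw [pvAnsRef]
          simp only [hk, Bool.false_eq_true, if_false, if_true]
          rw [show ([] : List String) ++ [x] = [x] from rfl,
            pvAnsRef_a_run _ _ _ (fun y hy => (hrun y hy).trans hk)]
          cases hrc : xs.dropWhile (fun y => PySem.Str.endswith y "?" == PySem.Str.endswith x "?") with
          | nil =>
            simp [pvAnsRef]
          | cons q rest' =>
            have hne := List.head?_dropWhile_not
              (fun y => PySem.Str.endswith y "?" == PySem.Str.endswith x "?") xs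
            rw [hrc] at hne
            simp only [List.head?_cons] at hne
            have hqq : pvIsQ q = true := by
              have hk'' : PySem.Chars.endswith x.toList ['?'] = false := by simpa using hk'
              simpa [pvIsQ, hk''] using hne
            rw [pvAnsRef]
            simp only [hqq, if_true]
            rw [pvAnsRef]
            simp only [hqq, if_true]
            simp
        · simp only [Bool.not_eq_true] at hs
          subst hs
          simp only [Bool.false_eq_true, if_false]
          rw [ih]
          conv_rhs => rw [hsplit]
          rw [pvAnsRef]
          simp only [hk, Bool.false_eq_true, if_false]
          rw [pvAnsRef_skip_run _ _ (fun y hy => (hrun y hy).trans hk)]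

lemma pvGroupFold (its : List String) (seen : Bool) (ans : List String) :
    ((pvGroupRuns its).foldl
      (fun (st : Bool × List String) g =>
        if g.1 then (true, st.2)
        else if st.1 then (st.1, st.2 ++ [PySem.Str.join " " g.2])
        else st)
      (seen, ans)).2 = ans ++ pvAnsRef seen [] its :=
  pvGroupFoldAux its.length its le_rfl seen ans

lemma pvFilter_congr (its : List String) :
    its.filter (fun l => PySem.Str.endswith l "?") = its.filter pvIsQ := rfl

-- ===== VERDICT (by name: the statement is the Claim_ definition above) =====
theorem split_questions_and_answers_spec : Claim_equal_split_questions_and_answers := by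
  intro lines _
  unfold Spec_split_questions_and_answers split_questions_and_answers split_questions_and_answers_alt
  simp only [pvFoldStrip, pvGroupFold, pvFilter_congr, List.nil_append]
  have h := pvMain ((lines.map PySem.Str.strip).filter (fun l => l ≠ "")) [] [] none []
  simp only [pvTruthyOptStr, Option.elim, List.nil_append] at h
  exact h
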